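-- pv_equiv track=rewrite | github.com/furqanahmadbasra/scalable_qa_system | src/data_ingestion.py | split_recursive
-- ===== SOURCE A (Python) =====
-- MAX_WORDS = 500
--
-- def split_recursive(text):
--     """
--     Tries to break text at natural boundaries, from coarsest to finest.
--     """
--     separators = ['\n\n', '\n', '. ', ' ']
--     pieces = []
--
--     def split_piece(t):
--         t = t.strip()
--         if not t:
--             return
--
--         if len(t.split()) <= MAX_WORDS:
--             pieces.append(t)
--             return
--
--         for sep in separators:
--             if sep in t:
--                 parts = t.split(sep)
--                 parts = [p.strip() for p in parts if p.strip()]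
--                 for p in parts:
--                     split_piece(p)
--                 return
--
--         # absolute fallback
--         words = t.split()
--         for i in range(0, len(words), MAX_WORDS):
--             pieces.append(" ".join(words[i: i + MAX_WORDS]))
--
--     split_piece(text)
--     return pieces
-- ===== SOURCE B (Python) =====
-- MAX_WORDS = 500
--
-- def split_recursive(text):
--     """Iterative re-implementation: explicit stack, pre-order DFS, no recursion."""
--     separators = ['\n\n', '\n', '. ', ' ']
--     pieces = []
--     stack = [text]
--     while stack:
--         t = stack.pop().strip()
--         if not t:
--             continue
--         words = t.split()
--         if len(words) <= MAX_WORDS: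
--             pieces.append(t)
--             continue
--         for sep in separators:
--             if sep in t:
--                 parts = [p.strip() for p in t.split(sep) if p.strip()]
--                 stack.extend(reversed(parts))
--                 break
--         else:
--             pieces.extend(" ".join(words[i:i + MAX_WORDS])
--                           for i in range(0, len(words), MAX_WORDS))
--     return pieces
-- ===== Notes on version B (the rewrite author's own statement) =====
-- stated objective: alternative
-- what changed: Replaces the recursive nested helper split_piece (recursion into each stripped part) by a single iterative while-loop over an explicit stack that pushes the parts back in reverse order, reproducing the pre-order DFS output without recursion.
import Mathlib
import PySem

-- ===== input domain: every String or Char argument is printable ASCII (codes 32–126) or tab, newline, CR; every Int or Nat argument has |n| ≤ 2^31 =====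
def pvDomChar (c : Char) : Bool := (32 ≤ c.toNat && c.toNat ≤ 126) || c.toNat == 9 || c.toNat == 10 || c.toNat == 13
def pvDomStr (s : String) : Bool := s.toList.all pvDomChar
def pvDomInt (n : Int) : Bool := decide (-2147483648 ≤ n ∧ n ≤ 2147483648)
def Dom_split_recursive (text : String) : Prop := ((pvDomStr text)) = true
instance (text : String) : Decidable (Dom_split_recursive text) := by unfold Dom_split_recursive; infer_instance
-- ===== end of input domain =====

-- B replaces A's recursive helper by an explicit-stack loop (pre-order DFS, no recursion); same return value, 'alternative' objective.

-- `[p.strip() for p in t.split(sep) if p.strip()]` — the stripped, nonempty parts (both Pythons contain this very comprehension)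
def pvParts (t sep : List Char) : List (List Char) :=
  ((PySem.Chars.splitOn t sep).map PySem.Chars.strip).filter (fun q => !q.isEmpty)

-- measure used only for termination of the two ports: Σ (2·|piece| + 1) over a list of pieces
def pvW (xs : List (List Char)) : Nat := (xs.map (fun p => 2 * p.length + 1)).sum

theorem pvW_cons (x : List Char) (xs : List (List Char)) : pvW (x :: xs) = 2 * x.length + 1 + pvW xs := by
  simp [pvW]
theorem pvW_append (a b : List (List Char)) : pvW (a ++ b) = pvW a + pvW b := by
  simp [pvW]
theorem pvW_reverse (a : List (List Char)) : pvW a.reverse = pvW a := by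
  simp [pvW, List.map_reverse]

theorem pvW_go_le (sep : List Char) (hsep : sep ≠ []) :
    ∀ (fuel : Nat) (l cur : List Char) (acc : List (List Char)),
      pvW (PySem.Chars.splitOn.go sep fuel l cur acc) ≤ pvW acc + 2*cur.length + 2*l.length + 1 := by
  intro fuel
  induction fuel with
  | zero =>
    intro l cur acc
    rw [PySem.Chars.splitOn.go]
    rw [pvW_reverse, pvW_cons]
    simp; omega
  | succ fuel IH =>
    intro l cur acc
    cases l with
    | nil =>
      rw [PySem.Chars.splitOn.go, pvW_reverse, pvW_cons] <;> simp <;> omega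
    | cons c rest =>
      rw [PySem.Chars.splitOn.go]
      by_cases h : sep.isPrefixOf (c :: rest) = true
      · rw [if_pos h]
        have hpre : sep <+: (c :: rest) := List.isPrefixOf_iff_prefix.mp h
        have hlen : sep.length ≤ rest.length + 1 := by
          have := hpre.length_le; simpa using this
        have hk : 1 ≤ sep.length := by
          cases sep with
          | nil => exact absurd rfl hsep
          | cons a s => simp
        have := IH (List.drop sep.length (c :: rest)) [] (cur.reverse :: acc)
        rw [pvW_cons] at this
        simp only [List.length_drop, List.length_cons, List.length_nil, List.length_reverse] at this ⊢
        omega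
      · rw [if_neg h]
        have := IH rest (c :: cur) acc
        simp only [List.length_cons] at this ⊢
        omega

theorem pvW_go_lt (sep : List Char) (hsep : sep ≠ []) :
    ∀ (fuel : Nat) (l cur : List Char) (acc : List (List Char)), l.length ≤ fuel → sep <:+: l →
      pvW (PySem.Chars.splitOn.go sep fuel l cur acc) ≤ pvW acc + 2*cur.length + 2*l.length := by
  intro fuel
  induction fuel with
  | zero =>
    intro l cur acc hl hinf
    have : l = [] := List.length_eq_zero_iff.mp (Nat.le_zero.mp hl)
    subst this
    exact absurd (List.eq_nil_of_infix_nil hinf) hsep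
  | succ fuel IH =>
    intro l cur acc hl hinf
    cases l with
    | nil => exact absurd (List.eq_nil_of_infix_nil hinf) hsep
    | cons c rest =>
      rw [PySem.Chars.splitOn.go]
      by_cases h : sep.isPrefixOf (c :: rest) = true
      · rw [if_pos h]
        have hpre : sep <+: (c :: rest) := List.isPrefixOf_iff_prefix.mp h
        have hlen : sep.length ≤ rest.length + 1 := by
          have := hpre.length_le; simpa using this
        have hk : 1 ≤ sep.length := by
          cases sep with
          | nil => exact absurd rfl hsep
          | cons a s => simp
        have := pvW_go_le sep hsep fuel (List.drop sep.length (c :: rest)) [] (cur.reverse :: acc)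
        rw [pvW_cons] at this
        simp only [List.length_drop, List.length_cons, List.length_nil, List.length_reverse] at this ⊢
        omega
      · rw [if_neg h]
        have hinf' : sep <:+: rest := by
          rcases List.infix_cons_iff.mp hinf with hp | ht
          · exact absurd (List.isPrefixOf_iff_prefix.mpr hp) h
          · exact ht
        have := IH rest (c :: cur) acc (by simpa using Nat.lt_succ_iff.mp (by simpa using hl)) hinf'
        simp only [List.length_cons] at this ⊢
        omega

theorem pvW_splitOn_le (s sep : List Char) (hsep : sep ≠ []) (h : PySem.Chars.isIn sep s = true) :
    pvW (PySem.Chars.splitOn s sep) ≤ 2 * s.length := by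
  have hinf : sep <:+: s := (PySem.Chars.isIn_iff_infix sep s).mp h
  rw [PySem.Chars.splitOn]
  have := pvW_go_lt sep hsep (s.length + 1) s [] [] (by omega) hinf
  simpa [pvW] using this

theorem pvStrip_length_le (s : List Char) : (PySem.Chars.strip s).length ≤ s.length := by
  rw [PySem.Chars.strip, PySem.Chars.rstrip, PySem.Chars.lstrip]
  calc (List.dropWhile PySem.Chars.isspace (List.dropWhile PySem.Chars.isspace s).reverse).reverse.length
      ≤ (List.dropWhile PySem.Chars.isspace s).reverse.length := by
        rw [List.length_reverse]; exact List.length_dropWhile_le _ _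
    _ ≤ s.length := by rw [List.length_reverse]; exact List.length_dropWhile_le _ _

theorem pvW_pvParts_le (t sep : List Char) (hsep : sep ≠ []) (hin : PySem.Chars.isIn sep t = true) :
    pvW (pvParts t sep) ≤ 2 * t.length := by
  have h1 : pvW (pvParts t sep) ≤ pvW (PySem.Chars.splitOn t sep) := by
    unfold pvParts
    calc pvW (((PySem.Chars.splitOn t sep).map PySem.Chars.strip).filter (fun q => !q.isEmpty))
        ≤ pvW ((PySem.Chars.splitOn t sep).map PySem.Chars.strip) := by
          unfold pvW
          exact List.Sublist.sum_le_sum ((List.filter_sublist).map _) (by intro a _; omega)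
      _ ≤ pvW (PySem.Chars.splitOn t sep) := by
          unfold pvW
          rw [List.map_map]
          exact List.sum_le_sum (by intro i _; simp; have := pvStrip_length_le i; omega)
  have h2 := pvW_splitOn_le t sep hsep hin
  omega

theorem pvPart_lt (t sep p : List Char) (hsep : sep ≠ []) (hin : PySem.Chars.isIn sep t = true)
    (hp : p ∈ pvParts t sep) : p.length < t.length := by
  unfold pvParts at hp
  have hp' : p ∈ (PySem.Chars.splitOn t sep).map PySem.Chars.strip := List.mem_of_mem_filter hp
  rcases List.mem_map.mp hp' with ⟨q, hq, rfl⟩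
  have h1 : 2 * q.length + 1 ≤ pvW (PySem.Chars.splitOn t sep) := by
    unfold pvW
    exact List.single_le_sum (by intro x _; omega) _ (List.mem_map.mpr ⟨q, hq, rfl⟩)
  have h2 := pvW_splitOn_le t sep hsep hin
  have h3 := pvStrip_length_le q
  omega

-- ===== PORT A =====
-- literal port of A's recursive split_piece (pieces accumulator = the closed-over list);
-- the 'for sep in separators: if sep in t' loop is the chain of four 'in' tests in source order
def pvPieceA (t : List Char) (pieces : List (List Char)) : List (List Char) :=
  let ts := PySem.Chars.strip t
  if ts.isEmpty then pieces
  else if (PySem.Chars.split₀ ts).length ≤ 500 then pieces ++ [ts]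
  else if h1 : PySem.Chars.isIn ['\n','\n'] ts = true then
    (pvParts ts ['\n','\n']).attach.foldl (fun acc p => pvPieceA p.1 acc) pieces
  else if h2 : PySem.Chars.isIn ['\n'] ts = true then
    (pvParts ts ['\n']).attach.foldl (fun acc p => pvPieceA p.1 acc) pieces
  else if h3 : PySem.Chars.isIn ['.',' '] ts = true then
    (pvParts ts ['.',' ']).attach.foldl (fun acc p => pvPieceA p.1 acc) pieces
  else if h4 : PySem.Chars.isIn [' '] ts = true then
    (pvParts ts [' ']).attach.foldl (fun acc p => pvPieceA p.1 acc) pieces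
  else
    let words := PySem.Chars.split₀ ts
    (PySem.List.pyRange 0 (words.length : Int) 500).foldl
      (fun acc i => acc ++ [PySem.Chars.join [' '] (PySem.List.slice words (some i) (some (i + 500)))]) pieces
termination_by t.length
decreasing_by
  · exact lt_of_lt_of_le (pvPart_lt _ _ _ (by simp) h1 p.2) (pvStrip_length_le t)
  · exact lt_of_lt_of_le (pvPart_lt _ _ _ (by simp) h2 p.2) (pvStrip_length_le t)
  · exact lt_of_lt_of_le (pvPart_lt _ _ _ (by simp) h3 p.2) (pvStrip_length_le t)
  · exact lt_of_lt_of_le (pvPart_lt _ _ _ (by simp) h4 p.2) (pvStrip_length_le t)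

def split_recursive (text : String) : List String :=
  (pvPieceA text.toList []).map (fun cs => String.ofList cs)

-- ===== PORT B =====
-- literal port of Source B's while-stack loop; the Lean list's HEAD is the Python stack's END
-- (so pop() = take the head, extend(reversed(parts)) = parts ++ stack)
def pvLoopB (stack : List (List Char)) (pieces : List (List Char)) : List (List Char) :=
  match stack with
  | [] => pieces
  | t0 :: rest =>
    let t := PySem.Chars.strip t0
    if t.isEmpty then pvLoopB rest pieces
    else
      let words := PySem.Chars.split₀ t
      if words.length ≤ 500 then pvLoopB rest (pieces ++ [t])
      else if h1 : PySem.Chars.isIn ['\n','\n'] t = true then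
        pvLoopB (pvParts t ['\n','\n'] ++ rest) pieces
      else if h2 : PySem.Chars.isIn ['\n'] t = true then
        pvLoopB (pvParts t ['\n'] ++ rest) pieces
      else if h3 : PySem.Chars.isIn ['.',' '] t = true then
        pvLoopB (pvParts t ['.',' '] ++ rest) pieces
      else if h4 : PySem.Chars.isIn [' '] t = true then
        pvLoopB (pvParts t [' '] ++ rest) pieces
      else
        pvLoopB rest (pieces ++ (PySem.List.pyRange 0 (words.length : Int) 500).map
          (fun i => PySem.Chars.join [' '] (PySem.List.slice words (some i) (some (i + 500)))))
termination_by pvW stack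
decreasing_by
  · rw [pvW_cons]; omega
  · rw [pvW_cons]; omega
  · rw [pvW_append, pvW_cons]
    have := pvW_pvParts_le (PySem.Chars.strip t0) ['\n','\n'] (by simp) h1
    have := pvStrip_length_le t0
    omega
  · rw [pvW_append, pvW_cons]
    have := pvW_pvParts_le (PySem.Chars.strip t0) ['\n'] (by simp) h2
    have := pvStrip_length_le t0
    omega
  · rw [pvW_append, pvW_cons]
    have := pvW_pvParts_le (PySem.Chars.strip t0) ['.',' '] (by simp) h3
    have := pvStrip_length_le t0
    omega
  · rw [pvW_append, pvW_cons]
    have := pvW_pvParts_le (PySem.Chars.strip t0) [' '] (by simp) h4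
    have := pvStrip_length_le t0
    omega
  · rw [pvW_cons]; omega

def split_recursive_alt (text : String) : List String :=
  (pvLoopB [text.toList] []).map (fun cs => String.ofList cs)

-- ===== PRECONDITION & SPEC =====
def Spec_split_recursive (text : String) (out : List String) : Prop := out = split_recursive_alt text
instance (text : String) (out : List String) : Decidable (Spec_split_recursive text out) := by unfold Spec_split_recursive; infer_instance

-- ===== CLAIM (what is proved, stated in full; the proofs are below) =====
def Claim_equal_split_recursive : Prop := ∀ (text : String), Dom_split_recursive text → Spec_split_recursive text (split_recursive text)

-- ===== LEMMAS AND PROOFS =====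

theorem pvStack_fold (ps : List (List Char))
    (H : ∀ p ∈ ps, ∀ rest pieces, pvLoopB (p :: rest) pieces = pvLoopB rest (pvPieceA p pieces)) :
    ∀ rest pieces, pvLoopB (ps ++ rest) pieces = pvLoopB rest (ps.foldl (fun acc p => pvPieceA p acc) pieces) := by
  induction ps with
  | nil => intro rest pieces; rfl
  | cons p ps IH =>
    intro rest pieces
    have h1 : pvLoopB ((p :: ps) ++ rest) pieces = pvLoopB (ps ++ rest) (pvPieceA p pieces) :=
      H p (List.mem_cons_self) (ps ++ rest) pieces
    rw [h1, IH (fun q hq => H q (List.mem_cons_of_mem _ hq))]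
    rfl

theorem pvBridge : ∀ (n : Nat) (t : List Char), t.length ≤ n →
    ∀ rest pieces, pvLoopB (t :: rest) pieces = pvLoopB rest (pvPieceA t pieces) := by
  intro n
  induction n using Nat.strong_induction_on with
  | _ n IHn =>
    intro t ht rest pieces
    rw [pvLoopB, pvPieceA]
    simp only
    by_cases he : (PySem.Chars.strip t).isEmpty
    · simp only [he, if_pos]
    · simp only [he, if_neg, Bool.false_eq_true, if_false]
      by_cases hw : (PySem.Chars.split₀ (PySem.Chars.strip t)).length ≤ 500
      · simp only [hw, if_pos]
      · simp only [hw, if_neg, if_false]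
        have hsepcase : ∀ (sep : List Char), sep ≠ [] →
            PySem.Chars.isIn sep (PySem.Chars.strip t) = true →
            pvLoopB (pvParts (PySem.Chars.strip t) sep ++ rest) pieces =
              pvLoopB rest ((pvParts (PySem.Chars.strip t) sep).attach.foldl
                (fun acc p => pvPieceA p.1 acc) pieces) := by
          intro sep hsep hin
          rw [List.foldl_attach (f := fun acc p => pvPieceA p acc)]
          exact pvStack_fold _ (fun p hp r pc =>
            IHn p.length
              (lt_of_lt_of_le (lt_of_lt_of_le (pvPart_lt _ sep p hsep hin hp) (pvStrip_length_le t)) ht)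
              p (le_refl _) r pc) rest pieces
        by_cases h1 : PySem.Chars.isIn ['\n','\n'] (PySem.Chars.strip t) = true
        · simp only [h1, dif_pos]; exact hsepcase _ (by simp) h1
        · simp only [h1, Bool.false_eq_true, dite_false]
          by_cases h2 : PySem.Chars.isIn ['\n'] (PySem.Chars.strip t) = true
          · simp only [h2, dif_pos]; exact hsepcase _ (by simp) h2
          · simp only [h2, Bool.false_eq_true, dite_false]
            by_cases h3 : PySem.Chars.isIn ['.',' '] (PySem.Chars.strip t) = true
            · simp only [h3, dif_pos]; exact hsepcase _ (by simp) h3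
            · simp only [h3, Bool.false_eq_true, dite_false]
              by_cases h4 : PySem.Chars.isIn [' '] (PySem.Chars.strip t) = true
              · simp only [h4, dif_pos]; exact hsepcase _ (by simp) h4
              · simp only [h4, Bool.false_eq_true, dite_false]
                rw [PySem.List.foldl_append_singleton_eq_map]

-- ===== VERDICT (by name: the statement is the Claim_ definition above) =====
theorem split_recursive_spec : Claim_equal_split_recursive := by
  intro text _
  unfold Spec_split_recursive split_recursive split_recursive_alt
  have h := pvBridge text.toList.length text.toList (le_refl _) [] []
  have h0 : pvLoopB [] (pvPieceA text.toList []) = pvPieceA text.toList [] := by rw [pvLoopB]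
  rw [h, h0]
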